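-- pv_equiv track=rewrite | github.com/ckoons/BubbleSpacetimeTheory | play/toy_352_bootstrap_percolation_vig.py | clause_bootstrap
-- ===== SOURCE A (Python) =====
-- from collections import defaultdict, deque
--
-- def clause_bootstrap(clauses, n, seed_set):
--     """Clause-aware bootstrap: variable v freezes if it appears in a clause
--     where all OTHER variables are already frozen.
--     This is the actual constraint propagation mechanism in SAT."""
--     frozen = set(seed_set)
--
--     # Build var → clause index
--     var_clauses = defaultdict(list)
--     for ci, vs in enumerate(clauses):
--         for v in vs:
--             var_clauses[v].append(ci)
--
--     history = [len(frozen)]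
--     round_num = 0
--
--     while True:
--         new_frozen = set()
--         for v in range(n):
--             if v in frozen:
--                 continue
--             for ci in var_clauses[v]:
--                 clause_vars = clauses[ci]
--                 others_frozen = all(u in frozen for u in clause_vars if u != v)
--                 if others_frozen:
--                     new_frozen.add(v)
--                     break
--
--         if not new_frozen:
--             break
--
--         frozen |= new_frozen
--         round_num += 1
--         history.append(len(frozen))
--
--     return frozen, round_num, history
-- ===== SOURCE B (Python) =====
-- def clause_bootstrap(clauses, n, seed_set):
--     """Clause-scan bootstrap: each round scans every clause once and freezes
--     the unique unfrozen variable of any clause that has exactly one left."""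
--     frozen = set(seed_set)
--     history = [len(frozen)]
--     round_num = 0
--     while True:
--         cands = set()
--         for clause in clauses:
--             unfrozen = {u for u in clause if u not in frozen}
--             if len(unfrozen) == 1:
--                 (w,) = unfrozen
--                 if 0 <= w < n:
--                     cands.add(w)
--         batch = sorted(cands)
--         if not batch:
--             break
--         for w in batch:
--             frozen.add(w)
--         round_num += 1
--         history.append(len(frozen))
--     return frozen, round_num, history
-- ===== Notes on version B (the rewrite author's own statement) =====
-- stated objective: faster
-- what changed: Instead of scanning all n variables each round and testing every clause of a prebuilt var-to-clauses index, B makes a single pass over the clauses per round, freezing the unique unfrozen variable of any clause with exactly one left (applied in ascending order, matching A's ascending variable scan).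
import Mathlib
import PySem

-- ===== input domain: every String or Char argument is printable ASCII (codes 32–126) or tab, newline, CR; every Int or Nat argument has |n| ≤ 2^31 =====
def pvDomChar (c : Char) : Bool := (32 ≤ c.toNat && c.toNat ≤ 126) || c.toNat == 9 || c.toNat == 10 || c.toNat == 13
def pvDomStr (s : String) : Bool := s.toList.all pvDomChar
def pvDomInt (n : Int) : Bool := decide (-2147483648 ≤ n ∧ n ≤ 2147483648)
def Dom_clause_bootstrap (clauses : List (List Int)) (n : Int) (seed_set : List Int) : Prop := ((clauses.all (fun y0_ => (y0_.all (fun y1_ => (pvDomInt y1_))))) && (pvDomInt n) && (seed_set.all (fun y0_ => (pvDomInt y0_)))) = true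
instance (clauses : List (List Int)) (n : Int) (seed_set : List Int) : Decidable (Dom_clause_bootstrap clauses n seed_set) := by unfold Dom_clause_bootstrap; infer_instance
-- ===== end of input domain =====

-- B replaces A's per-round scan of all n variables through a var→clauses index by a single
-- pass over the clauses per round, freezing the unique unfrozen variable of each clause that
-- has exactly one left (objective: faster per round; Python set iteration order is not
-- observable in the results: the frozen set is returned as a set and each round's batch is
-- added in ascending order, matching A's ascending variable scan).

-- ===== PORT A =====
-- var → clause-index map: defaultdict(list); var_clauses[v].append(ci)
def pvBuildVC (clauses : List (List Int)) : PySem.Dict Int (List Int) :=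
  (PySem.List.enumerate clauses).foldl
    (fun d p => p.2.foldl (fun d v => d.modify v [] (fun l => l ++ [p.1])) d)
    PySem.Dict.empty

-- 'for ci in var_clauses[v]: … new_frozen.add(v); break' — the loop-with-break adds v iff some
-- ci satisfies the test, rendered with List.any; the defaultdict read 'var_clauses[v]' inserts []
-- for a missing v, which is unobservable (the dict is not returned), so it is Dict.getD v [];
-- 'clauses[ci]' is always in range (ci comes from enumerate), so pyGetD never hits its default.
def pvNewA (clauses : List (List Int)) (vc : PySem.Dict Int (List Int)) (n : Int)
    (frozen : PySem.Set Int) : PySem.Set Int :=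
  (PySem.List.pyRange 0 n 1).foldl
    (fun nf v =>
      if PySem.Set.contains frozen v then nf
      else if (vc.getD v []).any (fun ci =>
          (PySem.List.pyGetD clauses ci []).all (fun u => u == v || PySem.Set.contains frozen u))
        then PySem.Set.add nf v else nf)
    PySem.Set.empty

-- 'while True' totalized with fuel; each productive round freezes a new variable of range(n),
-- so n.toNat + 1 rounds always suffice and the 0-fuel branch is unreachable.
def pvLoopA (clauses : List (List Int)) (vc : PySem.Dict Int (List Int)) (n : Int) :
    Nat → PySem.Set Int → Int → List Int → List Int × Int × List Int
  | 0, frozen, round_num, history => (frozen, round_num, history)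
  | fuel + 1, frozen, round_num, history =>
    let new_frozen := pvNewA clauses vc n frozen
    if new_frozen = [] then (frozen, round_num, history)
    else
      let frozen' := PySem.Set.union frozen new_frozen
      pvLoopA clauses vc n fuel frozen' (round_num + 1) (history ++ [PySem.Set.len frozen'])

def clause_bootstrap (clauses : List (List Int)) (n : Int) (seed_set : List Int) :
    List Int × Int × List Int :=
  let frozen := PySem.Set.ofList seed_set
  let var_clauses := pvBuildVC clauses
  pvLoopA clauses var_clauses n (n.toNat + 1) frozen 0 [PySem.Set.len frozen]

-- ===== PORT B =====
-- one pass over the clauses: 'unfrozen = {u for u in clause if u not in frozen}';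
-- 'if len(unfrozen) == 1: (w,) = unfrozen' is the [w] pattern of the match.
def pvNewB (clauses : List (List Int)) (n : Int) (frozen : PySem.Set Int) : PySem.Set Int :=
  clauses.foldl
    (fun cands clause =>
      match PySem.Set.ofList (clause.filter (fun u => !(PySem.Set.contains frozen u))) with
      | [w] => if 0 ≤ w ∧ w < n then PySem.Set.add cands w else cands
      | _ => cands)
    PySem.Set.empty

def pvLoopB (clauses : List (List Int)) (n : Int) :
    Nat → PySem.Set Int → Int → List Int → List Int × Int × List Int
  | 0, frozen, round_num, history => (frozen, round_num, history)
  | fuel + 1, frozen, round_num, history =>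
    let batch := PySem.List.sorted (pvNewB clauses n frozen) (fun x => x)
    if batch = [] then (frozen, round_num, history)
    else
      let frozen' := batch.foldl PySem.Set.add frozen
      pvLoopB clauses n fuel frozen' (round_num + 1) (history ++ [PySem.Set.len frozen'])

def clause_bootstrap_alt (clauses : List (List Int)) (n : Int) (seed_set : List Int) :
    List Int × Int × List Int :=
  let frozen := PySem.Set.ofList seed_set
  pvLoopB clauses n (n.toNat + 1) frozen 0 [PySem.Set.len frozen]

-- ===== PRECONDITION & SPEC =====
def Spec_clause_bootstrap (clauses : List (List Int)) (n : Int) (seed_set : List Int) (out : List Int × Int × List Int) : Prop := out = clause_bootstrap_alt clauses n seed_set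
instance (clauses : List (List Int)) (n : Int) (seed_set : List Int) (out : List Int × Int × List Int) : Decidable (Spec_clause_bootstrap clauses n seed_set out) := by unfold Spec_clause_bootstrap; infer_instance

-- ===== CLAIM (what is proved, stated in full; the proofs are below) =====
def Claim_equal_clause_bootstrap : Prop := ∀ (clauses : List (List Int)) (n : Int) (seed_set : List Int), Dom_clause_bootstrap clauses n seed_set → Spec_clause_bootstrap clauses n seed_set (clause_bootstrap clauses n seed_set)

-- ===== LEMMAS AND PROOFS =====

-- the freezing condition, shared shape of both per-round computations
def pvFreezes (clauses : List (List Int)) (frozen : PySem.Set Int) (v : Int) : Prop :=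
  ∃ c ∈ clauses, v ∈ c ∧ ∀ u ∈ c, u ≠ v → u ∈ frozen

-- var_clauses as a filter of the flattened (var, clause-index) pairs
theorem pvVC_getD (clauses : List (List Int)) (v : Int) :
    (pvBuildVC clauses).getD v [] =
      (((PySem.List.enumerate clauses).flatMap (fun p => p.2.map (fun u => (u, p.1)))).filter
        (fun q => q.1 == v)).map (fun q => q.2) := by
  unfold pvBuildVC
  have h1 : ∀ (l : List (Int × List Int)) (d : PySem.Dict Int (List Int)),
      l.foldl (fun d p => p.2.foldl (fun d u => d.modify u [] (fun l => l ++ [p.1])) d) d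
        = (l.flatMap (fun p => p.2.map (fun u => (u, p.1)))).foldl
            (fun d q => d.modify q.1 [] (fun l => l ++ [q.2])) d := by
    intro l d
    rw [List.foldl_flatMap]
    congr 1
    funext d p
    rw [List.foldl_map]
  rw [h1, PySem.Dict.getD_foldl_modify_append]
  simp [PySem.Dict.getD_empty]

-- A's 'any' over var_clauses[v] IS the freezing condition
theorem pvCondA_iff (clauses : List (List Int)) (frozen : PySem.Set Int) (v : Int) :
    ((pvBuildVC clauses).getD v []).any (fun ci =>
        (PySem.List.pyGetD clauses ci []).all (fun u => u == v || PySem.Set.contains frozen u)) = true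
      ↔ pvFreezes clauses frozen v := by
  have hget : ∀ (k : Nat), k < clauses.length →
      PySem.List.pyGetD clauses ((k : Int)) [] = clauses[k]! := by
    intro k hk
    rw [PySem.List.pyGetD_natCast]
    rw [List.getD_eq_getElem _ _ hk, List.getElem!_eq_getElem?_getD]
    simp [List.getElem?_eq_getElem hk]
  rw [pvVC_getD]
  simp only [List.any_map, List.any_filter, List.any_eq_true, List.mem_flatMap,
    PySem.List.mem_enumerate_iff, List.mem_map, pvFreezes]
  constructor
  · rintro ⟨q, ⟨⟨p, ⟨⟨k, hk, rfl⟩, ⟨u, hu, rfl⟩⟩⟩, hcond⟩⟩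
    simp only [Function.comp_apply, beq_iff_eq, Bool.and_eq_true, zero_add] at hcond hu ⊢
    obtain ⟨rfl, hall⟩ := hcond
    rw [hget k hk] at hall
    refine ⟨clauses[k], List.getElem_mem _, hu, ?_⟩
    intro x hx hxv
    have hx' : x ∈ clauses[k]! := by
      simpa [List.getElem!_eq_getElem?_getD, List.getElem?_eq_getElem hk] using hx
    have := (List.all_eq_true.mp hall) x hx'
    simp only [Bool.or_eq_true, beq_iff_eq] at this
    rcases this with h | h
    · exact absurd h hxv
    · exact (PySem.Set.contains_iff frozen x).mp h
  · rintro ⟨c, hc, hvc, hall⟩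
    obtain ⟨k, hk, rfl⟩ := List.mem_iff_getElem.mp hc
    refine ⟨(v, (k : Int)), ⟨⟨((0 : Int) + (k : Int), clauses[k]), ⟨⟨k, hk, rfl⟩, ⟨v, hvc, by simp⟩⟩⟩, ?_⟩⟩
    simp only [Function.comp_apply, beq_iff_eq, Bool.and_eq_true]
    refine ⟨trivial, ?_⟩
    rw [hget k hk]
    simp only [List.all_eq_true, Bool.or_eq_true, beq_iff_eq]
    intro x hx
    have hx' : x ∈ clauses[k] := by
      simpa [List.getElem!_eq_getElem?_getD, List.getElem?_eq_getElem hk] using hx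
    by_cases hxv : x = v
    · exact Or.inl hxv
    · exact Or.inr ((PySem.Set.contains_iff frozen x).mpr (hall x hx' hxv))

-- the skip/test/add fold over a nodup list fresh for the accumulator is a filter
theorem pvFoldl_if_add_eq_filter (p q : Int → Bool) :
    ∀ (l : List Int) (acc : PySem.Set Int), l.Nodup → (∀ x ∈ l, x ∉ acc) →
    l.foldl (fun s v => if p v then s else if q v then PySem.Set.add s v else s) acc
      = acc ++ l.filter (fun v => !p v && q v)
  | [], acc, _, _ => by simp
  | a :: l, acc, hnd, hdisj => by
    simp only [List.foldl_cons, List.filter_cons]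
    by_cases hp : p a = true
    · rw [if_pos hp]
      have := pvFoldl_if_add_eq_filter p q l acc (by simpa using hnd.of_cons)
        (fun x hx => hdisj x (List.mem_cons_of_mem _ hx))
      simp [hp, this]
    · rw [if_neg hp]
      by_cases hq : q a = true
      · rw [if_pos hq, PySem.Set.add_of_not_mem (hdisj a (List.mem_cons_self))]
        have := pvFoldl_if_add_eq_filter p q l (acc ++ [a]) (by simpa using hnd.of_cons)
          (by intro x hx
              simp only [List.mem_append, List.mem_singleton]
              rintro (h | rfl)
              · exact hdisj x (List.mem_cons_of_mem _ hx) h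
              · exact (List.nodup_cons.mp hnd).1 hx)
        simp [hp, hq, this]
      · rw [if_neg hq]
        have := pvFoldl_if_add_eq_filter p q l acc (by simpa using hnd.of_cons)
          (fun x hx => hdisj x (List.mem_cons_of_mem _ hx))
        simp [hp, hq, this]

-- A's fold is a filter of the ascending range
theorem pvNewA_eq_filter (clauses : List (List Int)) (n : Int) (frozen : PySem.Set Int) :
    pvNewA clauses (pvBuildVC clauses) n frozen =
      (PySem.List.pyRange 0 n 1).filter
        (fun v => !(PySem.Set.contains frozen v) &&
          ((pvBuildVC clauses).getD v []).any (fun ci =>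
            (PySem.List.pyGetD clauses ci []).all (fun u => u == v || PySem.Set.contains frozen u))) := by
  unfold pvNewA
  rw [pvFoldl_if_add_eq_filter _ _ _ _ (PySem.List.nodup_pyRange_one 0 n) (by intro x _ hx; cases hx)]
  rfl

theorem pvOfList_eq_singleton_iff (l : List Int) (w : Int) :
    PySem.Set.ofList l = [w] ↔ w ∈ l ∧ ∀ u ∈ l, u = w := by
  constructor
  · intro h
    constructor
    · have : w ∈ PySem.Set.ofList l := by rw [h]; simp
      exact (PySem.Set.mem_ofList l w).mp this
    · intro u hu
      have : u ∈ PySem.Set.ofList l := (PySem.Set.mem_ofList l u).mpr hu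
      rw [h] at this; simpa using this
  · rintro ⟨hw, hall⟩
    have hperm : (PySem.Set.ofList l).Perm [w] := by
      rw [List.perm_ext_iff_of_nodup (PySem.Set.nodup_ofList l) (List.nodup_singleton w)]
      intro a
      simp only [PySem.Set.mem_ofList, List.mem_singleton]
      exact ⟨fun ha => hall a ha, fun h => h ▸ hw⟩
    exact List.perm_singleton.mp hperm

-- B's singleton-unfrozen-set test IS the freezing condition for its witness
theorem pvSingleton_unfrozen_iff (c : List Int) (frozen : PySem.Set Int) (w : Int) :
    PySem.Set.ofList (c.filter (fun u => !(PySem.Set.contains frozen u))) = [w]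
      ↔ w ∈ c ∧ w ∉ frozen ∧ ∀ u ∈ c, u ≠ w → u ∈ frozen := by
  rw [pvOfList_eq_singleton_iff]
  simp only [List.mem_filter, Bool.not_eq_eq_eq_not, Bool.not_true,
    PySem.Set.contains_eq_listContains, List.contains_eq_mem, decide_eq_false_iff_not]
  constructor
  · rintro ⟨⟨hwc, hwf⟩, hall⟩
    refine ⟨hwc, hwf, ?_⟩
    intro u hu hne
    by_contra huf
    exact hne (hall u ⟨hu, huf⟩)
  · rintro ⟨hwc, hwf, hall⟩
    refine ⟨⟨hwc, hwf⟩, ?_⟩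
    rintro u ⟨hu, huf⟩
    by_contra hne
    exact huf (hall u hu hne)

theorem pvFold_newB_mem (n : Int) (frozen : PySem.Set Int) :
    ∀ (l : List (List Int)) (acc : PySem.Set Int) (w : Int),
    (w ∈ l.foldl
      (fun cands clause =>
        match PySem.Set.ofList (clause.filter (fun u => !(PySem.Set.contains frozen u))) with
        | [w] => if 0 ≤ w ∧ w < n then PySem.Set.add cands w else cands
        | _ => cands) acc)
      ↔ w ∈ acc ∨ ((0 ≤ w ∧ w < n) ∧ ∃ c ∈ l,
          PySem.Set.ofList (c.filter (fun u => !(PySem.Set.contains frozen u))) = [w])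
  | [], acc, w => by simp
  | c :: l, acc, w => by
    simp only [List.foldl_cons]
    rcases hu : PySem.Set.ofList (c.filter (fun u => !(PySem.Set.contains frozen u))) with _ | ⟨x, _ | ⟨y, t⟩⟩
    · dsimp only
      rw [pvFold_newB_mem n frozen l acc w]
      simp only [List.exists_mem_cons_iff, hu]
      simp only [reduceCtorEq, false_or]
    · dsimp only
      by_cases hx : 0 ≤ x ∧ x < n
      · rw [if_pos hx, pvFold_newB_mem n frozen l (PySem.Set.add acc x) w]
        simp only [PySem.Set.mem_add, List.exists_mem_cons_iff, hu, List.cons.injEq, and_true]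
        constructor
        · rintro ((h | rfl) | ⟨hw, hex⟩)
          · exact Or.inl h
          · exact Or.inr ⟨hx, Or.inl rfl⟩
          · exact Or.inr ⟨hw, Or.inr hex⟩
        · rintro (h | ⟨hw, rfl | hex⟩)
          · exact Or.inl (Or.inl h)
          · exact Or.inl (Or.inr rfl)
          · exact Or.inr ⟨hw, hex⟩
      · rw [if_neg hx, pvFold_newB_mem n frozen l acc w]
        simp only [List.exists_mem_cons_iff, hu, List.cons.injEq, and_true]
        constructor
        · rintro (h | ⟨hw, hex⟩)
          · exact Or.inl h
          · exact Or.inr ⟨hw, Or.inr hex⟩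
        · rintro (h | ⟨hw, rfl | hex⟩)
          · exact Or.inl h
          · exact absurd hw hx
          · exact Or.inr ⟨hw, hex⟩
    · dsimp only
      rw [pvFold_newB_mem n frozen l acc w]
      simp only [List.exists_mem_cons_iff, hu]
      have hne : (x :: y :: t : List Int) ≠ [w] := by simp
      tauto

theorem pvFold_newB_nodup (n : Int) (frozen : PySem.Set Int) :
    ∀ (l : List (List Int)) (acc : PySem.Set Int), acc.Nodup →
    (l.foldl
      (fun cands clause =>
        match PySem.Set.ofList (clause.filter (fun u => !(PySem.Set.contains frozen u))) with
        | [w] => if 0 ≤ w ∧ w < n then PySem.Set.add cands w else cands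
        | _ => cands) acc).Nodup
  | [], _, h => h
  | c :: l, acc, h => by
    simp only [List.foldl_cons]
    refine pvFold_newB_nodup n frozen l _ ?_
    rcases PySem.Set.ofList (c.filter (fun u => !(PySem.Set.contains frozen u))) with _ | ⟨x, _ | ⟨y, t⟩⟩
    · exact h
    · dsimp only
      split_ifs with hx
      · exact PySem.Set.nodup_add acc x h
      · exact h
    · exact h

theorem pvMem_newB (clauses : List (List Int)) (n : Int) (frozen : PySem.Set Int) (w : Int) :
    w ∈ pvNewB clauses n frozen ↔
      (0 ≤ w ∧ w < n) ∧ w ∉ frozen ∧ pvFreezes clauses frozen w := by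
  unfold pvNewB
  rw [pvFold_newB_mem n frozen clauses PySem.Set.empty w]
  simp only [PySem.Set.empty, List.not_mem_nil, false_or]
  constructor
  · rintro ⟨hw, c, hc, hs⟩
    obtain ⟨hwc, hwf, hall⟩ := (pvSingleton_unfrozen_iff c frozen w).mp hs
    exact ⟨hw, hwf, c, hc, hwc, hall⟩
  · rintro ⟨hw, hwf, c, hc, hwc, hall⟩
    exact ⟨hw, c, hc, (pvSingleton_unfrozen_iff c frozen w).mpr ⟨hwc, hwf, hall⟩⟩

-- the per-round computations agree, batch in ascending order
theorem pvStep_eq (clauses : List (List Int)) (n : Int) (frozen : PySem.Set Int) :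
    PySem.List.sorted (pvNewB clauses n frozen) (fun x => x) =
      pvNewA clauses (pvBuildVC clauses) n frozen := by
  rw [pvNewA_eq_filter]
  apply PySem.List.sorted_eq_of_perm_of_pairwise_lt
  · unfold pvNewB
    rw [List.perm_ext_iff_of_nodup
      (List.Nodup.filter _ (PySem.List.nodup_pyRange_one 0 n))
      (pvFold_newB_nodup n frozen clauses PySem.Set.empty List.nodup_nil)]
    intro v
    rw [List.mem_filter]
    have hm := pvMem_newB clauses n frozen v
    unfold pvNewB at hm
    rw [hm]
    simp only [Bool.and_eq_true, PySem.List.mem_pyRange_one]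
    rw [pvCondA_iff clauses frozen v]
    simp only [Bool.not_eq_eq_eq_not, Bool.not_true,
      PySem.Set.contains_eq_listContains, List.contains_eq_mem, decide_eq_false_iff_not]
  · exact List.Pairwise.filter _ (PySem.List.pairwise_lt_pyRange_one 0 n)

theorem pvUnion_eq_foldl_add (s t : PySem.Set Int) :
    PySem.Set.union s t = t.foldl PySem.Set.add s := rfl

theorem pvLoop_eq (clauses : List (List Int)) (n : Int) : ∀ (fuel : Nat)
    (frozen : PySem.Set Int) (r : Int) (h : List Int),
    pvLoopA clauses (pvBuildVC clauses) n fuel frozen r h = pvLoopB clauses n fuel frozen r h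
  | 0, frozen, r, h => rfl
  | fuel + 1, frozen, r, h => by
    simp only [pvLoopA, pvLoopB, pvStep_eq clauses n frozen, pvUnion_eq_foldl_add]
    split_ifs with hnf
    · rfl
    · exact pvLoop_eq clauses n fuel _ _ _

-- ===== VERDICT (by name: the statement is the Claim_ definition above) =====
theorem clause_bootstrap_spec : Claim_equal_clause_bootstrap := by
  intro clauses n seed_set _
  unfold Spec_clause_bootstrap clause_bootstrap clause_bootstrap_alt
  exact pvLoop_eq clauses n (n.toNat + 1) (PySem.Set.ofList seed_set) 0 _
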